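-- pv_equiv track=rewrite | github.com/HenryNavarro1998/ia_project_2 | utils.py | handle_move
-- ===== SOURCE A (Python) =====
-- BOARD_SIZE = 4  # Tamaño del tablero (4x4)
--
-- def handle_move(board, move):
--     """
--     Ejecuta un movimiento válido en el tablero y retorna el nuevo estado.
--
--     Args:
--         board (list): Estado actual del tablero
--         move (tuple): Tupla con posiciones ((fila_origen, columna_origen), (fila_destino, columna_destino))
--
--     Returns:
--         list: Nuevo estado del tablero después del movimiento
--     """
--     new_board = [row.copy() for row in board]  # Copia profunda del tablero
--
--     from_pos, to_pos = move
--     from_x, from_y = from_pos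
--     to_x, to_y = to_pos
--
--     # Validación de movimiento (no implementada completamente)
--     if move not in generate_moves(board, board[from_x][from_y].lower()):
--         return board  # Devuelve el tablero original si el movimiento es inválido
--
--     # Ejecutar movimiento
--     new_board[to_x][to_y] = new_board[from_x][from_y]
--     new_board[from_x][from_y] = None
--
--     # Manejar capturas (movimientos de 2 casillas)
--     if abs(from_x - to_x) == 2:
--         mid_x = (from_x + to_x) // 2
--         mid_y = (from_y + to_y) // 2
--         new_board[mid_x][mid_y] = None  # Eliminar pieza capturadas
--
--     # Coronación de reyes (Nota: Condición podría necesitar ajustes)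
--     if new_board[to_x][to_y] in ["o", "x"]:  # Solo para piezas normales
--         # 'o' se corona en la última fila (3), 'x' en la primera (0)
--         if (new_board[to_x][to_y] == "o" and to_x == 3) or \
--            (new_board[to_x][to_y] == "x" and to_x == 0):
--             new_board[to_x][to_y] = new_board[to_x][to_y].upper()  # Convertir a mayúscula para reyes
--
--     return new_board
--
-- def generate_moves(board, player):
--     """
--     Genera todos los movimientos válidos para un jugador en el estado actual.
--
--     Args:
--         board (list): Estado actual del tablero
--         player (str): 'o' o 'x' indicando el jugador actual
--
--     Returns:
--         list: Lista de movimientos válidos en formato ((from_x, from_y), (to_x, to_y))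
--     """
--     MOVES = [(-1, -1), (-1, 1), (1, -1), (1, 1)]  # Direcciones posibles
--     valid_moves = []
--
--     def in_bounds(x, y):
--         """Verifica si las coordenadas están dentro del tablero"""
--         return 0 <= x < BOARD_SIZE and 0 <= y < BOARD_SIZE
--
--     for i in range(BOARD_SIZE):
--         for j in range(BOARD_SIZE):
--             piece = board[i][j]
--             if piece and piece.lower() == player:
--                 # Determinar direcciones permitidas según tipo de pieza
--                 directions = MOVES
--                 if piece.islower():  # Piezas normales
--                     directions = [(1, -1), (1, 1)] if player == "o" else [(-1, -1), (-1, 1)]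
--
--                 for dx, dy in directions:
--                     # Movimiento simple
--                     to_x, to_y = i + dx, j + dy
--                     if in_bounds(to_x, to_y) and not board[to_x][to_y]:
--                         valid_moves.append(((i, j), (to_x, to_y)))
--
--                     # Movimiento de captura
--                     capture_x, capture_y = i + 2*dx, j + 2*dy
--                     mid_x, mid_y = i + dx, j + dy
--                     if (in_bounds(capture_x, capture_y) and
--                         not board[capture_x][capture_y] and
--                         board[mid_x][mid_y] and
--                         board[mid_x][mid_y].lower() != player):
--                         valid_moves.append(((i, j), (capture_x, capture_y)))
--
--     return valid_moves
-- ===== SOURCE B (Python) =====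
-- BOARD_SIZE = 4
--
-- def handle_move(board, move):
--     # Direct single-move legality test instead of enumerating all moves.
--     (fx, fy), (tx, ty) = move
--     piece = board[fx][fy]          # AttributeError on empty square, as in the original
--     player = piece.lower()
--
--     def ok(x, y):
--         return 0 <= x < BOARD_SIZE and 0 <= y < BOARD_SIZE
--
--     if piece.islower():
--         dirs = [(1, -1), (1, 1)] if player == "o" else [(-1, -1), (-1, 1)]
--     else:
--         dirs = [(-1, -1), (-1, 1), (1, -1), (1, 1)]
--
--     valid = False
--     if piece and ok(fx, fy):
--         for dx, dy in dirs:
--             if (tx, ty) == (fx + dx, fy + dy) and ok(tx, ty) and not board[tx][ty]: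
--                 valid = True
--             if ((tx, ty) == (fx + 2 * dx, fy + 2 * dy) and ok(tx, ty)
--                     and not board[tx][ty]
--                     and board[fx + dx][fy + dy]
--                     and board[fx + dx][fy + dy].lower() != player):
--                 valid = True
--     if not valid:
--         return board
--
--     new_board = [row.copy() for row in board]
--     new_board[tx][ty] = piece
--     new_board[fx][fy] = None
--     if abs(fx - tx) == 2:
--         new_board[(fx + tx) // 2][(fy + ty) // 2] = None
--     v = new_board[tx][ty]
--     if (v == "o" and tx == 3) or (v == "x" and tx == 0):
--         new_board[tx][ty] = v.upper()
--     return new_board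
-- ===== Notes on version B (the rewrite author's own statement) =====
-- stated objective: alternative
-- what changed: B replaces A's enumeration of every legal move on the board (generate_moves over all 16 squares) followed by a list membership test with a direct legality predicate that checks only the move's own source square against the piece's allowed diagonal directions, then performs the same mutation, capture removal and crowning.
import Mathlib
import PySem

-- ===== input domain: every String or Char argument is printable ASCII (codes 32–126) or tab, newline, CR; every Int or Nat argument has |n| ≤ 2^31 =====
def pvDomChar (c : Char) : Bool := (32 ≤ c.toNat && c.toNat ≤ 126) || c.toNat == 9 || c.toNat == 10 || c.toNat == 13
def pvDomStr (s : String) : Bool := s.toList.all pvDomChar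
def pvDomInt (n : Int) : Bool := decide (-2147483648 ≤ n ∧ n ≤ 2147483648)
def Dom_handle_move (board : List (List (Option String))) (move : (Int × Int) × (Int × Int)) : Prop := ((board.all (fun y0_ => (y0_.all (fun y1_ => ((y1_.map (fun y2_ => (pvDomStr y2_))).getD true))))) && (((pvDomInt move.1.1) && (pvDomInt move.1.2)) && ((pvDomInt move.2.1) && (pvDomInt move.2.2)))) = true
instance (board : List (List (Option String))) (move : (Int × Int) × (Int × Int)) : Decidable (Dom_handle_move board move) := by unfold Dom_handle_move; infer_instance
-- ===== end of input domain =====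

-- B replaces A's full-board generate_moves enumeration + membership test by a direct
-- single-move legality predicate on the source square (objective: alternative, not timed faster).
-- Equivalence is about the RETURN value; neither program mutates its arguments.

-- shared primitives (exact Python semantics on the ASCII domain)
-- board[x][y] read; total form, only used where Python's read succeeds
def pvCell (board : List (List (Option String))) (x y : Int) : Option String :=
  (PySem.List.pyGet? ((PySem.List.pyGet? board x).getD []) y).getD none

-- Python truthiness of a square: None and "" are falsy
def pvTruthy : Option String → Bool
  | none => false
  | some s => !(s == "")

-- new_board[x][y] = v (only executed on validated nonnegative in-range indices)
def pvSet2 (b : List (List (Option String))) (x y : Int) (v : Option String) : List (List (Option String)) :=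
  b.modify x.toNat (fun row => row.set y.toNat v)

-- str.islower(): at least one cased char and no uppercase cased char (exact on ASCII)
def pvIslower (s : String) : Bool :=
  s.toList.any (fun c => PySem.Str.isalpha c) && s.toList.all (fun c => !PySem.Str.isupper c)

-- allowed directions per piece ('directions' in both programs; player = piece.lower())
def pvDirs (piece player : String) : List (Int × Int) :=
  if pvIslower piece then
    (if player == "o" then [(1, -1), (1, 1)] else [(-1, -1), (-1, 1)])
  else [(-1, -1), (-1, 1), (1, -1), (1, 1)]

def pvInBounds (x y : Int) : Bool := decide (0 ≤ x ∧ x < 4 ∧ 0 ≤ y ∧ y < 4)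

-- ===== PORT A =====
-- per-square body of generate_moves' nested loop: the moves appended for square (i, j)
def pvCand (board : List (List (Option String))) (player : String) (i j : Int) :
    List ((Int × Int) × (Int × Int)) :=
  let piece := pvCell board i j
  if pvTruthy piece && (PySem.Str.lower (piece.getD "") == player) then
    let directions := pvDirs (piece.getD "") player
    directions.foldl (fun acc d =>
      let acc' := if pvInBounds (i + d.1) (j + d.2) && !pvTruthy (pvCell board (i + d.1) (j + d.2))
                  then acc ++ [((i, j), (i + d.1, j + d.2))] else acc
      if pvInBounds (i + 2*d.1) (j + 2*d.2) && !pvTruthy (pvCell board (i + 2*d.1) (j + 2*d.2))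
         && pvTruthy (pvCell board (i + d.1) (j + d.2))
         && !(PySem.Str.lower ((pvCell board (i + d.1) (j + d.2)).getD "") == player)
      then acc' ++ [((i, j), (i + 2*d.1, j + 2*d.2))] else acc') []
  else []

def generate_moves (board : List (List (Option String))) (player : String) :
    List ((Int × Int) × (Int × Int)) :=
  (PySem.List.pyRange 0 4 1).foldl (fun acc i =>
    (PySem.List.pyRange 0 4 1).foldl (fun acc j => acc ++ pvCand board player i j) acc) []

def handle_move (board : List (List (Option String))) (move : (Int × Int) × (Int × Int)) :
    List (List (Option String)) :=
  let new_board := board.map (fun row => row)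
  let fx := move.1.1; let fy := move.1.2; let tx := move.2.1; let ty := move.2.2
  if !((generate_moves board (PySem.Str.lower ((pvCell board fx fy).getD ""))).contains move) then
    board
  else
    let nb := pvSet2 new_board tx ty (pvCell new_board fx fy)
    let nb := pvSet2 nb fx fy none
    let nb := if (fx - tx).natAbs == 2 then
        pvSet2 nb (PySem.Int.floordiv (fx + tx) 2) (PySem.Int.floordiv (fy + ty) 2) none
      else nb
    let v := pvCell nb tx ty
    if v == some "o" || v == some "x" then
      if (v == some "o" && decide (tx = 3)) || (v == some "x" && decide (tx = 0)) then
        pvSet2 nb tx ty (v.map PySem.Str.upper)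
      else nb
    else nb

-- ===== PORT B =====
def handle_move_alt (board : List (List (Option String))) (move : (Int × Int) × (Int × Int)) :
    List (List (Option String)) :=
  let fx := move.1.1; let fy := move.1.2; let tx := move.2.1; let ty := move.2.2
  let piece := (pvCell board fx fy).getD ""
  let player := PySem.Str.lower piece
  let dirs := pvDirs piece player
  let valid := !(piece == "") && pvInBounds fx fy &&
    dirs.foldl (fun v d =>
      let v' := v || ((tx, ty) == (fx + d.1, fy + d.2) && pvInBounds tx ty
                      && !pvTruthy (pvCell board tx ty))
      v' || ((tx, ty) == (fx + 2*d.1, fy + 2*d.2) && pvInBounds tx ty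
             && !pvTruthy (pvCell board tx ty)
             && pvTruthy (pvCell board (fx + d.1) (fy + d.2))
             && !(PySem.Str.lower ((pvCell board (fx + d.1) (fy + d.2)).getD "") == player))) false
  if !valid then board
  else
    let nb := pvSet2 board tx ty (some piece)
    let nb := pvSet2 nb fx fy none
    let nb := if (fx - tx).natAbs == 2 then
        pvSet2 nb (PySem.Int.floordiv (fx + tx) 2) (PySem.Int.floordiv (fy + ty) 2) none
      else nb
    let v := pvCell nb tx ty
    if (v == some "o" && decide (tx = 3)) || (v == some "x" && decide (tx = 0)) then
      pvSet2 nb tx ty (v.map PySem.Str.upper)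
    else nb

-- ===== PRECONDITION & SPEC =====
-- Pre_ = exactly where A returns: board[i][j] exists for i,j < 4 (else generate_moves raises
-- IndexError) and the source square is a real index holding a string (else IndexError /
-- AttributeError on board[from_x][from_y].lower()).
def Pre_handle_move (board : List (List (Option String))) (move : (Int × Int) × (Int × Int)) : Prop :=
  4 ≤ board.length ∧ (∀ r ∈ board.take 4, 4 ≤ r.length) ∧
  ((PySem.List.pyGet? board move.1.1).bind
      (fun r => PySem.List.pyGet? r move.1.2)).join.isSome = true
instance (board : List (List (Option String))) (move : (Int × Int) × (Int × Int)) : Decidable (Pre_handle_move board move) := by unfold Pre_handle_move; infer_instance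

def pvWitness_handle_move : List (List (Option String)) × ((Int × Int) × (Int × Int)) :=
  ([[some "o", none, none, none], [none, none, none, none],
    [none, none, none, none], [none, none, none, none]], ((0, 0), (1, 1)))

def Spec_handle_move (board : List (List (Option String))) (move : (Int × Int) × (Int × Int)) (out : List (List (Option String))) : Prop := out = handle_move_alt board move
instance (board : List (List (Option String))) (move : (Int × Int) × (Int × Int)) (out : List (List (Option String))) : Decidable (Spec_handle_move board move out) := by unfold Spec_handle_move; infer_instance

-- ===== CLAIM (what is proved, stated in full; the proofs are below) =====
def Claim_equal_handle_move : Prop := ∀ (board : List (List (Option String))) (move : (Int × Int) × (Int × Int)), Dom_handle_move board move → Pre_handle_move board move → Spec_handle_move board move (handle_move board move)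

-- ===== LEMMAS AND PROOFS =====

-- membership in the inner direction loop of pvCand
theorem mem_foldl_two_if {α β : Type} (l : List β) (p q : β → Bool) (f g : β → α)
    (init : List α) (m : α) :
    (m ∈ l.foldl (fun acc d =>
        let acc' := if p d then acc ++ [f d] else acc
        if q d then acc' ++ [g d] else acc') init) ↔
      m ∈ init ∨ ∃ d ∈ l, (p d = true ∧ m = f d) ∨ (q d = true ∧ m = g d) := by
  induction l generalizing init with
  | nil => simp
  | cons x xs ih =>
    have hstep : ∀ (init : List α), (m ∈ (let acc' := if p x then init ++ [f x] else init;
        if q x then acc' ++ [g x] else acc')) ↔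
        m ∈ init ∨ (p x = true ∧ m = f x) ∨ (q x = true ∧ m = g x) := by
      intro init; split_ifs <;> simp_all
    simp only [List.foldl_cons, ih, hstep, List.mem_cons]
    constructor
    · rintro (h | ⟨d, hd, h⟩)
      · rcases h with h | h | h
        · exact Or.inl h
        · exact Or.inr ⟨x, Or.inl rfl, Or.inl h⟩
        · exact Or.inr ⟨x, Or.inl rfl, Or.inr h⟩
      · exact Or.inr ⟨d, Or.inr hd, h⟩
    · rintro (h | ⟨d, rfl | hd, h⟩)
      · exact Or.inl (Or.inl h)
      · exact Or.inl (Or.inr h)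
      · exact Or.inr ⟨d, hd, h⟩

-- B's or-accumulating loop is List.any
theorem foldl_or_eq_any {β : Type} (l : List β) (a b : β → Bool) (init : Bool) :
    l.foldl (fun v d => (v || a d) || b d) init = (init || l.any (fun d => a d || b d)) := by
  induction l generalizing init with
  | nil => simp
  | cons x xs ih => simp [ih]; cases init <;> cases a x <;> cases b x <;> simp

theorem gen_eq_flatMap (board : List (List (Option String))) (player : String) :
    generate_moves board player =
      ([0, 1, 2, 3] : List Int).flatMap (fun i =>
        ([0, 1, 2, 3] : List Int).flatMap (fun j => pvCand board player i j)) := by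
  have h4 : PySem.List.pyRange 0 4 1 = [0, 1, 2, 3] := by decide
  unfold generate_moves
  rw [h4]
  simp only [PySem.List.foldl_append_eq_flatMap, List.nil_append]

-- membership in pvCand, unfolded
theorem mem_cand_iff (board : List (List (Option String))) (player : String) (i j : Int)
    (m : (Int × Int) × (Int × Int)) :
    m ∈ pvCand board player i j ↔
      ((pvTruthy (pvCell board i j) && (PySem.Str.lower ((pvCell board i j).getD "") == player)) = true ∧
       ∃ d ∈ pvDirs ((pvCell board i j).getD "") player,
         ((pvInBounds (i + d.1) (j + d.2)
             && !pvTruthy (pvCell board (i + d.1) (j + d.2))) = true ∧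
            m = ((i, j), (i + d.1, j + d.2))) ∨
         ((pvInBounds (i + 2*d.1) (j + 2*d.2)
             && !pvTruthy (pvCell board (i + 2*d.1) (j + 2*d.2))
             && pvTruthy (pvCell board (i + d.1) (j + d.2))
             && !(PySem.Str.lower ((pvCell board (i + d.1) (j + d.2)).getD "") == player)) = true ∧
            m = ((i, j), (i + 2*d.1, j + 2*d.2)))) := by
  simp only [pvCand]
  split_ifs with hg
  · simp only [hg, true_and]
    exact (mem_foldl_two_if _ _ _ _ _ [] m).trans (by simp)
  · simp only [List.not_mem_nil, false_iff]
    intro ⟨h, _⟩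
    exact hg h

-- the central fact: A's membership test equals B's direct legality predicate
theorem contains_gen_eq_valid (board : List (List (Option String))) (piece : String)
    (fx fy tx ty : Int) (hcell : pvCell board fx fy = some piece) :
    ((generate_moves board (PySem.Str.lower piece)).contains ((fx, fy), (tx, ty))) =
      (!(piece == "") && pvInBounds fx fy &&
        (pvDirs piece (PySem.Str.lower piece)).any (fun d =>
          ((tx, ty) == (fx + d.1, fy + d.2) && pvInBounds tx ty
            && !pvTruthy (pvCell board tx ty))
          || ((tx, ty) == (fx + 2*d.1, fy + 2*d.2) && pvInBounds tx ty
              && !pvTruthy (pvCell board tx ty)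
              && pvTruthy (pvCell board (fx + d.1) (fy + d.2))
              && !(PySem.Str.lower ((pvCell board (fx + d.1) (fy + d.2)).getD "")
                    == PySem.Str.lower piece)))) := by
  rw [Bool.eq_iff_iff, List.contains_iff_mem, gen_eq_flatMap]
  simp only [List.mem_flatMap, mem_cand_iff]
  constructor
  · rintro ⟨i, hi, j, hj, hguard, d, hd, h⟩
    simp only [List.mem_cons, List.not_mem_nil, or_false] at hi hj
    simp only [Bool.and_eq_true, List.any_eq_true]
    rcases h with ⟨hc, hm⟩ | ⟨hc, hm⟩ <;>
      simp only [Prod.mk.injEq] at hm <;>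
      obtain ⟨⟨rfl, rfl⟩, rfl, rfl⟩ := hm <;>
      rw [hcell] at hguard hd <;>
      simp only [Option.getD_some, Bool.and_eq_true] at hguard hd hc ⊢ <;>
      refine ⟨⟨by simpa [pvTruthy] using hguard.1, by unfold pvInBounds; simp; omega⟩, d, hd, ?_⟩ <;>
      simp only [Bool.or_eq_true, Bool.and_eq_true]
    · exact Or.inl ⟨⟨by simp, hc.1⟩, hc.2⟩
    · exact Or.inr ⟨⟨⟨⟨by simp, hc.1.1.1⟩, hc.1.1.2⟩, hc.1.2⟩, hc.2⟩
  · rintro h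
    simp only [Bool.and_eq_true, List.any_eq_true] at h
    obtain ⟨⟨hne, hbounds⟩, d, hd, hc⟩ := h
    have hin : 0 ≤ fx ∧ fx < 4 ∧ 0 ≤ fy ∧ fy < 4 := by
      have := hbounds; unfold pvInBounds at this; simpa using this
    refine ⟨fx, by simp; omega, fy, by simp; omega, ?_⟩
    rw [hcell]
    simp only [Option.getD_some]
    refine ⟨by simp [pvTruthy, hne], d, hd, ?_⟩
    rcases Bool.or_eq_true_iff.mp hc with hc | hc
    · simp only [Bool.and_eq_true, beq_iff_eq, Prod.mk.injEq] at hc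
      obtain ⟨⟨⟨h1, h2⟩, _⟩, h3⟩ := hc
      left
      rw [← h1, ← h2]
      simp_all
    · simp only [Bool.and_eq_true, beq_iff_eq, Prod.mk.injEq] at hc
      obtain ⟨⟨⟨⟨⟨h1, h2⟩, _⟩, h3⟩, h4⟩, h5⟩ := hc
      right
      rw [← h1, ← h2]
      simp_all

-- A's nested crowning test collapses to B's single test (the inner condition implies the outer)
theorem crown_eq (nb : List (List (Option String))) (tx ty : Int) :
    (if (pvCell nb tx ty == some "o" || pvCell nb tx ty == some "x") then
       (if ((pvCell nb tx ty == some "o" && decide (tx = 3))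
            || (pvCell nb tx ty == some "x" && decide (tx = 0))) then
          pvSet2 nb tx ty ((pvCell nb tx ty).map PySem.Str.upper) else nb)
     else nb) =
    (if ((pvCell nb tx ty == some "o" && decide (tx = 3))
         || (pvCell nb tx ty == some "x" && decide (tx = 0))) then
       pvSet2 nb tx ty ((pvCell nb tx ty).map PySem.Str.upper) else nb) := by
  by_cases h : ((pvCell nb tx ty == some "o" && decide (tx = 3))
      || (pvCell nb tx ty == some "x" && decide (tx = 0))) = true
  · have houter : (pvCell nb tx ty == some "o" || pvCell nb tx ty == some "x") = true := by
      rcases Bool.or_eq_true_iff.mp h with h | h <;>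
        rw [Bool.and_eq_true] at h <;> simp [h.1]
    rw [if_pos houter]
  · rw [if_neg h, ite_self]

theorem handle_move_spec : Claim_equal_handle_move := by
  intro board move hdom hpre
  obtain ⟨⟨fx, fy⟩, tx, ty⟩ := move
  obtain ⟨hlen, hrows, hsrc⟩ := hpre
  obtain ⟨piece, hcell⟩ : ∃ piece, pvCell board fx fy = some piece := by
    unfold pvCell
    dsimp only at hsrc
    cases hr : PySem.List.pyGet? board fx with
    | none => rw [hr] at hsrc; simp at hsrc
    | some r =>
      rw [hr] at hsrc
      simp only [Option.bind_some] at hsrc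
      cases hc : PySem.List.pyGet? r fy with
      | none => rw [hc] at hsrc; simp at hsrc
      | some c =>
        rw [hc] at hsrc
        cases c with
        | none => simp at hsrc
        | some p =>
          exact ⟨p, by simp only [Option.getD_some]; rw [hc]; rfl⟩
  show _ = _
  unfold handle_move handle_move_alt
  dsimp only
  rw [hcell]
  simp only [Option.getD_some, List.map_id_fun', id_eq]
  rw [contains_gen_eq_valid board piece fx fy tx ty hcell]
  simp only [foldl_or_eq_any, Bool.false_or]
  by_cases h : (!(!piece == "" && pvInBounds fx fy &&
      (pvDirs piece (PySem.Str.lower piece)).any fun d =>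
        (tx, ty) == (fx + d.1, fy + d.2) && pvInBounds tx ty && !pvTruthy (pvCell board tx ty) ||
          (tx, ty) == (fx + 2 * d.1, fy + 2 * d.2) && pvInBounds tx ty
            && !pvTruthy (pvCell board tx ty) &&
              pvTruthy (pvCell board (fx + d.1) (fy + d.2)) &&
            !PySem.Str.lower ((pvCell board (fx + d.1) (fy + d.2)).getD "")
              == PySem.Str.lower piece)) = true
  · rw [if_pos h, if_pos h]
  · rw [if_neg h, if_neg h, hcell]
    exact crown_eq _ tx ty
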